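-- pv_equiv track=rewrite | github.com/srus1608/Python_Codewars_Solution_in_python | 7kyu/Clean up after your dog.py | crap
-- ===== SOURCE A (Python) =====
-- def crap(garden, bags, cap):
--     c = 0
--     for el in garden:
--         for e in el:
--             if e == "@":
--                 c += 1
--             if e == "D":
--                 return "Dog!!"
--
--     return "Clean" if c <= bags * cap else "Cr@p"
-- ===== SOURCE B (Python) =====
-- def crap(garden, bags, cap):
--     cells = [e for row in garden for e in row]
--     if 'D' in cells:
--         return "Dog!!"
--     return "Clean" if cells.count('@') <= bags * cap else "Cr@p"
-- ===== Notes on version B (the rewrite author's own statement) =====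
-- stated objective: simpler
-- what changed: Replaces A's single interleaved nested loop (counting '@' while dog-detecting with an early return) by a flatten-then-detect-then-count decomposition: flatten the garden once, one membership test for 'D', one list.count for '@'.
import Mathlib
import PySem

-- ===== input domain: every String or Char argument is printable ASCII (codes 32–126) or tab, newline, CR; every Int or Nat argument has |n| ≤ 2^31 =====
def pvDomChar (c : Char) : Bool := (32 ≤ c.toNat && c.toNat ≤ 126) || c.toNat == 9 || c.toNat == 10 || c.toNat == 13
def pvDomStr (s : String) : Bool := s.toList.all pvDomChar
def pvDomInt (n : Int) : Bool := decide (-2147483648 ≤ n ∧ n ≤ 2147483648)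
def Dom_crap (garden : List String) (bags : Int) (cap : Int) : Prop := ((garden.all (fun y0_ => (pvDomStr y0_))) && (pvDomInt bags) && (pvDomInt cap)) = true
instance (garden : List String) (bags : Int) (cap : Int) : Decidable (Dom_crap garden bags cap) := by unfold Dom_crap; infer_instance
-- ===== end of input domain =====

-- B replaces A's single interleaved nested loop (count '@' and dog-detect with early return)
-- by flatten-then-detect-then-count: objective is a simpler decomposition, not speed.


-- ===== PORT A =====
-- inner 'for e in el' loop: carries the count c, early-returns .inr "Dog!!" on 'D'
def crapRow (c : Int) : List Char → Sum Int String
  | [] => .inl c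
  | e :: rest =>
    let c' := if e = '@' then c + 1 else c
    if e = 'D' then .inr "Dog!!" else crapRow c' rest

-- outer 'for el in garden' loop
def crapLoop (c : Int) : List String → Sum Int String
  | [] => .inl c
  | row :: rest =>
    match crapRow c row.toList with
    | .inl c' => crapLoop c' rest
    | .inr s => .inr s

def crap (garden : List String) (bags : Int) (cap : Int) : String :=
  match crapLoop 0 garden with
  | .inr s => s
  | .inl c => if c ≤ bags * cap then "Clean" else "Cr@p"

-- ===== PORT B =====
def crap_alt (garden : List String) (bags : Int) (cap : Int) : String :=
  let cells := (garden.map String.toList).flatten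
  if 'D' ∈ cells then "Dog!!"
  else if (cells.count '@' : Int) ≤ bags * cap then "Clean" else "Cr@p"

-- ===== PRECONDITION & SPEC =====
def Spec_crap (garden : List String) (bags : Int) (cap : Int) (out : String) : Prop := out = crap_alt garden bags cap
instance (garden : List String) (bags : Int) (cap : Int) (out : String) : Decidable (Spec_crap garden bags cap out) := by unfold Spec_crap; infer_instance

-- ===== CLAIM (what is proved, stated in full; the proofs are below) =====
def Claim_equal_crap : Prop := ∀ (garden : List String) (bags : Int) (cap : Int), Dom_crap garden bags cap → Spec_crap garden bags cap (crap garden bags cap)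

-- ===== LEMMAS AND PROOFS =====
theorem crapRow_eq (c : Int) (l : List Char) :
    crapRow c l = if 'D' ∈ l then .inr "Dog!!" else .inl (c + (l.count '@' : Int)) := by
  induction l generalizing c with
  | nil => simp [crapRow]
  | cons e rest ih =>
    by_cases hD : e = 'D'
    · subst hD; simp [crapRow]
    · rw [crapRow, if_neg hD, ih]
      by_cases hc : 'D' ∈ rest
      · rw [if_pos hc, if_pos (List.mem_cons_of_mem _ hc)]
      · rw [if_neg hc, if_neg (fun h => (List.mem_cons.mp h).elim (fun h' => hD h'.symm) hc)]
        by_cases ha : e = '@'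
        · subst ha; simp; push_cast; ring
        · simp [ha]

theorem crapLoop_eq (c : Int) (rows : List String) :
    crapLoop c rows =
      if 'D' ∈ (rows.map String.toList).flatten then .inr "Dog!!"
      else .inl (c + (((rows.map String.toList).flatten).count '@' : Int)) := by
  induction rows generalizing c with
  | nil => simp [crapLoop]
  | cons row rest ih =>
    rw [crapLoop, crapRow_eq]
    by_cases h1 : 'D' ∈ row.toList
    · rw [if_pos h1, if_pos (by simp [h1])]
    · rw [if_neg h1]
      dsimp only
      rw [ih]
      by_cases h2 : 'D' ∈ (rest.map String.toList).flatten
      · rw [if_pos h2, if_pos (by simp_all)]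
      · rw [if_neg h2, if_neg (by simp_all)]
        simp [List.count_append]; ring

-- ===== VERDICT (by name: the statement is the Claim_ definition above) =====
theorem crap_spec : Claim_equal_crap := by
  intro garden bags cap _
  unfold Spec_crap crap crap_alt
  rw [crapLoop_eq]
  by_cases h : 'D' ∈ (garden.map String.toList).flatten
  · rw [if_pos h]; simp [h]
  · rw [if_neg h]; simp [h]
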